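-- pv_equiv track=rewrite | github.com/debola31/Contour | api/routes/parts_import_routes.py | _get_column_samples
-- ===== SOURCE A (Python) =====
-- def _get_column_samples(
--     headers: list[str],
--     sample_rows: list[list[str]],
--     skip_columns: set[str],
-- ) -> dict[str, str]:
--     """Get one sample value per non-empty column.
--
--     Efficiently collects the first non-empty value found for each column.
--     This minimizes token usage while giving AI context about data format.
--
--     Args:
--         headers: All column headers
--         sample_rows: First 5 rows of sample data
--         skip_columns: Columns to skip (e.g., pricing pairs already handled)
--
--     Returns:
--         Dict mapping column name to one sample value (non-empty columns only)
--     """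
--     samples: dict[str, str] = {}
--
--     for row in sample_rows:
--         for i, header in enumerate(headers):
--             # Skip if in skip_columns or we already have a sample
--             if header in skip_columns or header in samples:
--                 continue
--
--             # Get value if exists and is non-empty
--             value = row[i].strip() if i < len(row) else ""
--             if value:
--                 samples[header] = value
--
--         # Early exit if we have samples for all eligible columns
--         eligible_count = len(headers) - len(skip_columns)
--         if len(samples) >= eligible_count:
--             break
--
--     return samples
-- ===== SOURCE B (Python) =====
-- def _get_column_samples(
--     headers: list[str],
--     sample_rows: list[list[str]],
--     skip_columns: set[str],
-- ) -> dict[str, str]: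
--     """Worklist version: keep a shrinking list of (index, header) pairs still
--     needing a sample, so each row only touches unsampled eligible columns."""
--     samples: dict[str, str] = {}
--     pending = [(i, h) for i, h in enumerate(headers) if h not in skip_columns]
--     needed = len(headers) - len(skip_columns)
--
--     for row in sample_rows:
--         still: list[tuple[int, str]] = []
--         for i, h in pending:
--             if h in samples:
--                 continue
--             value = row[i].strip() if i < len(row) else ""
--             if value:
--                 samples[h] = value
--             else:
--                 still.append((i, h))
--         pending = still
--         if len(samples) >= needed or not pending:
--             break
--
--     return samples
-- ===== Notes on version B (the rewrite author's own statement) =====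
-- stated objective: alternative
-- what changed: The per-row rescan of all headers with per-cell skip-set and samples-dict membership tests is replaced by a worklist algorithm: the eligible (index, header) pairs are computed once up front and the list shrinks as columns get sampled, so each row only visits columns still needing a sample.
import Mathlib
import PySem

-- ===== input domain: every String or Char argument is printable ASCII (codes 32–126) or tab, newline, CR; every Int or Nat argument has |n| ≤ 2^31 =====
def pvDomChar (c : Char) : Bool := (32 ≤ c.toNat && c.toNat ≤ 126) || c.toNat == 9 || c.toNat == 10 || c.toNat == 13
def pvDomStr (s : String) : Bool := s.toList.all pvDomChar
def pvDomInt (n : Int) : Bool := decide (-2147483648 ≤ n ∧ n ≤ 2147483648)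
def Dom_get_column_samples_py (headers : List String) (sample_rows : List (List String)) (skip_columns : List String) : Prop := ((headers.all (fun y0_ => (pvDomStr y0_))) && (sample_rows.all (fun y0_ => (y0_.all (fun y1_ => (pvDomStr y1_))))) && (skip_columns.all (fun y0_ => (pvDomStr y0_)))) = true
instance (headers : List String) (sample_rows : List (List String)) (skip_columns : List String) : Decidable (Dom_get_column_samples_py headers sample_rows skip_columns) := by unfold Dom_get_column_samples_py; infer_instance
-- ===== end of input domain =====

-- B replaces A's rescan of every header on every row (with per-cell skip/sampled
-- membership tests) by a shrinking worklist of (index, header) pairs still needing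
-- a sample, keeping the early exit once enough samples are collected.

-- ===== PORT A =====
-- inner 'for i, header in enumerate(headers)' loop of A, one row
def pvARow (skip_columns : List String) (headers : List String) (row : List String)
    (d : PySem.Dict String String) : PySem.Dict String String :=
  (PySem.List.enumerate headers).foldl (fun d p =>
    if PySem.Set.contains skip_columns p.2 || d.contains p.2 then d
    else
      let value := if p.1 < (row.length : Int) then PySem.Str.strip (PySem.List.pyGetD row p.1 "") else ""
      if value ≠ "" then d.insert p.2 value else d) d

-- outer 'for row in sample_rows' loop with the early 'break'
def pvALoop (headers : List String) (skip_columns : List String) :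
    List (List String) → PySem.Dict String String → PySem.Dict String String
  | [], d => d
  | row :: rest, d =>
    let d' := pvARow skip_columns headers row d
    if ((headers.length : Int) - (skip_columns.length : Int)) ≤ (d'.size : Int) then d'
    else pvALoop headers skip_columns rest d'

def get_column_samples_py (headers : List String) (sample_rows : List (List String)) (skip_columns : List String) : List (String × String) :=
  (pvALoop headers skip_columns sample_rows PySem.Dict.empty).items

-- ===== PORT B =====
-- Source B inner 'for i, h in pending' loop, one row; state = (still, samples)
def pvBRow (row : List String) (pending : List (Int × String)) (samples : PySem.Dict String String) :
    List (Int × String) × PySem.Dict String String :=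
  pending.foldl (fun st p =>
    if st.2.contains p.2 then st
    else
      let value := if p.1 < (row.length : Int) then PySem.Str.strip (PySem.List.pyGetD row p.1 "") else ""
      if value ≠ "" then (st.1, st.2.insert p.2 value) else (st.1 ++ [p], st.2)) ([], samples)

-- Source B outer 'for row in sample_rows' loop with its 'break'
def pvBLoop : List (List String) → List (Int × String) → Int → PySem.Dict String String → PySem.Dict String String
  | [], _, _, samples => samples
  | row :: rest, pending, needed, samples =>
    let st := pvBRow row pending samples
    if needed ≤ (st.2.size : Int) ∨ st.1 = [] then st.2
    else pvBLoop rest st.1 needed st.2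

def get_column_samples_py_alt (headers : List String) (sample_rows : List (List String)) (skip_columns : List String) : List (String × String) :=
  (pvBLoop sample_rows
    ((PySem.List.enumerate headers).filter (fun p => !(PySem.Set.contains skip_columns p.2)))
    ((headers.length : Int) - (skip_columns.length : Int))
    PySem.Dict.empty).items

-- ===== PRECONDITION & SPEC =====
def Spec_get_column_samples_py (headers : List String) (sample_rows : List (List String)) (skip_columns : List String) (out : List (String × String)) : Prop := out = get_column_samples_py_alt headers sample_rows skip_columns
instance (headers : List String) (sample_rows : List (List String)) (skip_columns : List String) (out : List (String × String)) : Decidable (Spec_get_column_samples_py headers sample_rows skip_columns out) := by unfold Spec_get_column_samples_py; infer_instance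

-- ===== CLAIM (what is proved, stated in full; the proofs are below) =====
def Claim_equal_get_column_samples_py : Prop := ∀ (headers : List String) (sample_rows : List (List String)) (skip_columns : List String), Dom_get_column_samples_py headers sample_rows skip_columns → Spec_get_column_samples_py headers sample_rows skip_columns (get_column_samples_py headers sample_rows skip_columns)

-- ===== LEMMAS AND PROOFS =====

-- the cell value at column i of a row (A's and B's common 'value' expression)
def pvVI (row : List String) (i : Int) : String :=
  if i < (row.length : Int) then PySem.Str.strip (PySem.List.pyGetD row i "") else ""

-- A's per-cell step once p is known to be eligible (not skipped)
def pvG (row : List String) (d : PySem.Dict String String) (p : Int × String) : PySem.Dict String String :=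
  if d.contains p.2 then d else if pvVI row p.1 ≠ "" then d.insert p.2 (pvVI row p.1) else d

-- B's per-cell step on the (still, samples) state
def pvFB (row : List String) (st : List (Int × String) × PySem.Dict String String) (p : Int × String) :
    List (Int × String) × PySem.Dict String String :=
  if st.2.contains p.2 then st
  else if pvVI row p.1 ≠ "" then (st.1, st.2.insert p.2 (pvVI row p.1)) else (st.1 ++ [p], st.2)

theorem pvBRow_eq_foldl (row : List String) (pending : List (Int × String)) (s : PySem.Dict String String) :
    pvBRow row pending s = pending.foldl (pvFB row) ([], s) := rfl

-- a fold whose condition depends only on the element skips exactly the filtered elements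
theorem pv_foldl_skip {α β : Type} (q : α → Bool) (g : β → α → β) :
    ∀ (l : List α) (acc : β),
      l.foldl (fun d x => if q x then d else g d x) acc = (l.filter (fun x => !q x)).foldl g acc := by
  intro l
  induction l with
  | nil => intro acc; rfl
  | cons x t ih =>
    intro acc
    cases hx : q x <;> simp [hx, ih]

theorem pvARow_eq (skip headers : List String) (row : List String) (d : PySem.Dict String String) :
    pvARow skip headers row d
      = ((PySem.List.enumerate headers).filter (fun p => !(PySem.Set.contains skip p.2))).foldl (pvG row) d := by
  unfold pvARow
  have hf : (fun (d : PySem.Dict String String) (p : Int × String) =>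
      if PySem.Set.contains skip p.2 || d.contains p.2 then d
      else
        let value := if p.1 < (row.length : Int) then PySem.Str.strip (PySem.List.pyGetD row p.1 "") else ""
        if value ≠ "" then d.insert p.2 value else d)
      = (fun d p => if PySem.Set.contains skip p.2 then d else pvG row d p) := by
    funext d p
    cases hs : PySem.Set.contains skip p.2
    · simp [pvG, pvVI]
    · simp
  rw [hf, pv_foldl_skip]

-- contains is monotone along a pvG-fold
theorem pvG_contains_mono (row : List String) :
    ∀ (l : List (Int × String)) (d : PySem.Dict String String) (k : String),
      d.contains k = true → (l.foldl (pvG row) d).contains k = true := by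
  intro l
  induction l with
  | nil => intro d k h; exact h
  | cons p t ih =>
    intro d k h
    refine ih _ k ?_
    unfold pvG
    split_ifs with h1 h2
    · exact h
    · rw [PySem.Dict.contains_insert, h, Bool.or_true]
    · exact h

-- a pvG-fold over cells whose headers are all already present does nothing
theorem pvG_foldl_id (row : List String) :
    ∀ (l : List (Int × String)) (d : PySem.Dict String String),
      (∀ q ∈ l, d.contains q.2 = true) → l.foldl (pvG row) d = d := by
  intro l
  induction l with
  | nil => intro d _; rfl
  | cons p t ih =>
    intro d h
    have hp : pvG row d p = d := by unfold pvG; rw [if_pos (h p (List.mem_cons_self ..))]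
    rw [List.foldl_cons, hp]
    exact ih d (fun q hq => h q (List.mem_cons_of_mem _ hq))

-- once everything eligible is sampled, A's remaining rows change nothing
theorem pvALoop_noop (headers skip : List String) :
    ∀ (rows : List (List String)) (d : PySem.Dict String String),
      (∀ q ∈ (PySem.List.enumerate headers).filter (fun p => !(PySem.Set.contains skip p.2)),
        d.contains q.2 = true) →
      pvALoop headers skip rows d = d := by
  intro rows
  induction rows with
  | nil => intro d _; rfl
  | cons row rest ih =>
    intro d h
    have hrow : pvARow skip headers row d = d := by
      rw [pvARow_eq]; exact pvG_foldl_id row _ d h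
    show (if _ ≤ ((pvARow skip headers row d).size : Int) then pvARow skip headers row d
          else pvALoop headers skip rest (pvARow skip headers row d)) = d
    rw [hrow]
    split_ifs
    · rfl
    · exact ih d h

-- MAIN ROW LEMMA: B's fold over a worklist P computes A's fold over all eligible cells E',
-- provided P is an (index-ordered) sub-worklist of E' covering every not-yet-sampled cell.
theorem pv_rowMain (row : List String) :
    ∀ (E' : List (Int × String)), E'.Pairwise (fun a b => a.1 < b.1) →
    ∀ (P : List (Int × String)), P.Sublist E' →
    ∀ (d : PySem.Dict String String) (acc : List (Int × String)),
      (∀ q ∈ E', q ∈ P ∨ d.contains q.2 = true) →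
      ∃ S, P.foldl (pvFB row) (acc, d) = (acc ++ S, E'.foldl (pvG row) d)
        ∧ S.Sublist E'
        ∧ ∀ q ∈ E', q ∈ S ∨ (E'.foldl (pvG row) d).contains q.2 = true := by
  intro E'
  induction E' with
  | nil =>
    intro _ P hsub d acc _
    rw [List.sublist_nil.mp hsub]
    exact ⟨[], by simp, List.nil_sublist _, by simp⟩
  | cons p rest ih =>
    intro hpw P hsub d acc hcov
    have hlt := (List.pairwise_cons.mp hpw).1
    have hpwrest := (List.pairwise_cons.mp hpw).2
    have hpnotin : p ∉ rest := fun hm => absurd (hlt p hm) (lt_irrefl _)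
    cases hsub with
    | cons _ h =>
      -- P ⊆ rest: the head cell p is not on the worklist, so it is already sampled
      have hpP : p ∉ P := fun hm => hpnotin (h.subset hm)
      have hcp : d.contains p.2 = true := (hcov p (List.mem_cons_self ..)).resolve_left hpP
      have hgp : pvG row d p = d := by unfold pvG; rw [if_pos hcp]
      obtain ⟨S, h1, h2, h3⟩ := ih hpwrest P h d acc
        (fun q hq => (hcov q (List.mem_cons_of_mem _ hq)).imp_left id)
      refine ⟨S, ?_, h2.cons _, ?_⟩
      · rw [h1, List.foldl_cons, hgp]
      · intro q hq
        rcases List.mem_cons.mp hq with rfl | hq'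
        · exact Or.inr (by rw [List.foldl_cons, hgp]; exact pvG_contains_mono row rest d q.2 hcp)
        · rw [List.foldl_cons, hgp]; exact h3 q hq'
    | cons₂ _ h =>
      -- P = p :: P': B processes the head cell p exactly as A does
      rename_i P'
      rw [List.foldl_cons, List.foldl_cons]
      by_cases hc : d.contains p.2 = true
      · have hfb : pvFB row (acc, d) p = (acc, d) := by unfold pvFB; rw [if_pos hc]
        have hgp : pvG row d p = d := by unfold pvG; rw [if_pos hc]
        obtain ⟨S, h1, h2, h3⟩ := ih hpwrest P' h d acc (fun q hq => by
          rcases hcov q (List.mem_cons_of_mem _ hq) with hm | hcn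
          · rcases List.mem_cons.mp hm with rfl | hm'
            · exact absurd hq hpnotin
            · exact Or.inl hm'
          · exact Or.inr hcn)
        refine ⟨S, by rw [hfb, h1, hgp], h2.cons _, ?_⟩
        intro q hq
        rcases List.mem_cons.mp hq with rfl | hq'
        · exact Or.inr (by rw [hgp]; exact pvG_contains_mono row rest d q.2 hc)
        · rw [hgp]; exact h3 q hq'
      · have hcb : d.contains p.2 = false := by cases hx : d.contains p.2; rfl; exact absurd hx hc
        by_cases hv : pvVI row p.1 ≠ ""
        · -- non-empty cell: both insert the sample
          have hfb : pvFB row (acc, d) p = (acc, d.insert p.2 (pvVI row p.1)) := by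
            unfold pvFB; rw [if_neg hc, if_pos hv]
          have hgp : pvG row d p = d.insert p.2 (pvVI row p.1) := by
            unfold pvG; rw [if_neg hc, if_pos hv]
          obtain ⟨S, h1, h2, h3⟩ := ih hpwrest P' h (d.insert p.2 (pvVI row p.1)) acc (fun q hq => by
            rcases hcov q (List.mem_cons_of_mem _ hq) with hm | hcn
            · rcases List.mem_cons.mp hm with rfl | hm'
              · exact absurd hq hpnotin
              · exact Or.inl hm'
            · exact Or.inr (by rw [PySem.Dict.contains_insert, hcn, Bool.or_true]))
          refine ⟨S, by rw [hfb, h1, hgp], h2.cons _, ?_⟩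
          intro q hq
          rcases List.mem_cons.mp hq with rfl | hq'
          · refine Or.inr (by
              rw [hgp]
              exact pvG_contains_mono row rest _ q.2 (PySem.Dict.contains_insert_self _ _ _))
          · rw [hgp]; exact h3 q hq'
        · -- empty cell: A does nothing, B keeps p on the worklist
          have hfb : pvFB row (acc, d) p = (acc ++ [p], d) := by
            unfold pvFB; rw [if_neg hc, if_neg hv]
          have hgp : pvG row d p = d := by unfold pvG; rw [if_neg hc, if_neg hv]
          obtain ⟨S', h1, h2, h3⟩ := ih hpwrest P' h d (acc ++ [p]) (fun q hq => by
            rcases hcov q (List.mem_cons_of_mem _ hq) with hm | hcn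
            · rcases List.mem_cons.mp hm with rfl | hm'
              · exact absurd hq hpnotin
              · exact Or.inl hm'
            · exact Or.inr hcn)
          refine ⟨p :: S', ?_, h2.cons₂ _, ?_⟩
          · rw [hfb, h1, hgp, List.append_assoc, List.singleton_append]
          · intro q hq
            rcases List.mem_cons.mp hq with rfl | hq'
            · exact Or.inl (List.mem_cons_self ..)
            · rw [hgp]
              rcases h3 q hq' with hm | hcn
              · exact Or.inl (List.mem_cons_of_mem _ hm)
              · exact Or.inr hcn

-- MAIN LOOP LEMMA
theorem pv_loopMain (headers skip : List String) :
    ∀ (rows : List (List String)) (P : List (Int × String)) (d : PySem.Dict String String),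
      P.Sublist ((PySem.List.enumerate headers).filter (fun p => !(PySem.Set.contains skip p.2))) →
      (∀ q ∈ (PySem.List.enumerate headers).filter (fun p => !(PySem.Set.contains skip p.2)),
        q ∈ P ∨ d.contains q.2 = true) →
      pvBLoop rows P ((headers.length : Int) - (skip.length : Int)) d = pvALoop headers skip rows d := by
  intro rows
  induction rows with
  | nil => intro P d _ _; rfl
  | cons row rest ih =>
    intro P d hsub hcov
    set E' := (PySem.List.enumerate headers).filter (fun p => !(PySem.Set.contains skip p.2)) with hE'
    have hpw : E'.Pairwise (fun a b => a.1 < b.1) :=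
      List.Pairwise.sublist List.filter_sublist (PySem.List.pairwise_lt_enumerate headers 0)
    obtain ⟨S, h1, h2, h3⟩ := pv_rowMain row E' hpw P hsub d [] hcov
    have hst : pvBRow row P d = (S, pvARow skip headers row d) := by
      rw [pvBRow_eq_foldl, h1, pvARow_eq, List.nil_append, hE']
    show (if _ ∨ _ then _ else _) = _
    rw [hst]
    show (if ((headers.length : Int) - (skip.length : Int)) ≤ ((pvARow skip headers row d).size : Int)
            ∨ S = [] then pvARow skip headers row d
          else pvBLoop rest S ((headers.length : Int) - (skip.length : Int)) (pvARow skip headers row d))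
        = pvALoop headers skip (row :: rest) d
    show _ = (if ((headers.length : Int) - (skip.length : Int)) ≤ ((pvARow skip headers row d).size : Int)
          then pvARow skip headers row d
          else pvALoop headers skip rest (pvARow skip headers row d))
    have h3' : ∀ q ∈ E', q ∈ S ∨ (pvARow skip headers row d).contains q.2 = true := by
      intro q hq
      rcases h3 q hq with hm | hcn
      · exact Or.inl hm
      · exact Or.inr (by rw [pvARow_eq, ← hE']; exact hcn)
    by_cases hq : ((headers.length : Int) - (skip.length : Int)) ≤ ((pvARow skip headers row d).size : Int)
    · rw [if_pos (Or.inl hq), if_pos hq]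
    · rw [if_neg hq]
      by_cases hS : S = []
      · rw [if_pos (Or.inr hS)]
        subst hS
        exact (pvALoop_noop headers skip rest _ (fun q hq => (h3' q hq).resolve_left (by simp))).symm
      · rw [if_neg (not_or.mpr ⟨hq, hS⟩)]
        exact ih S (pvARow skip headers row d) h2 h3'

-- ===== VERDICT (by name: the statement is the Claim_ definition above) =====
theorem get_column_samples_py_spec : Claim_equal_get_column_samples_py := by
  intro headers sample_rows skip_columns _
  unfold Spec_get_column_samples_py get_column_samples_py get_column_samples_py_alt
  rw [pv_loopMain headers skip_columns sample_rows _ PySem.Dict.empty (List.Sublist.refl _)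
    (fun q hq => Or.inl hq)]
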